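-- pv_equiv track=rewrite | github.com/MODSetter/SurfSense | surfsense_backend/app/agents/new_chat/tools/resume.py | _strip_imports
-- ===== SOURCE A (Python) =====
-- def _strip_imports(body: str) -> str:
--     """Remove any #import or #show lines the LLM might accidentally include."""
--     lines = body.split("\n")
--     cleaned: list[str] = []
--     skip_show = False
--     depth = 0
--
--     for line in lines:
--         stripped = line.strip()
--
--         if stripped.startswith("#import"):
--             continue
--
--         if skip_show:
--             depth += stripped.count("(") - stripped.count(")")
--             if depth <= 0:
--                 skip_show = False
--             continue
--
--         if stripped.startswith("#show:") and "rendercv" in stripped: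
--             depth = stripped.count("(") - stripped.count(")")
--             if depth > 0:
--                 skip_show = True
--             continue
--
--         cleaned.append(line)
--
--     result = "\n".join(cleaned).strip()
--     return result
-- ===== SOURCE B (Python) =====
-- def _strip_imports(body: str) -> str:
--     """Remove any #import or #show lines the LLM might accidentally include."""
--     lines = body.split("\n")
--     cleaned = []
--     i = 0
--     n = len(lines)
--     while i < n:
--         stripped = lines[i].strip()
--         if stripped.startswith("#import"):
--             i += 1
--             continue
--         if stripped.startswith("#show:") and "rendercv" in stripped:
--             depth = stripped.count("(") - stripped.count(")")
--             i += 1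
--             while i < n and depth > 0:
--                 s = lines[i].strip()
--                 if not s.startswith("#import"):
--                     depth += s.count("(") - s.count(")")
--                 i += 1
--             continue
--         cleaned.append(lines[i])
--         i += 1
--     return "\n".join(cleaned).strip()
-- ===== Notes on version B (the rewrite author's own statement) =====
-- stated objective: alternative
-- what changed: Replaces the persistent skip_show flag / depth state threaded through a single for-loop with an index-based outer loop plus a dedicated inner loop that consumes an open #show(...) block by paren balance.
import Mathlib
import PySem

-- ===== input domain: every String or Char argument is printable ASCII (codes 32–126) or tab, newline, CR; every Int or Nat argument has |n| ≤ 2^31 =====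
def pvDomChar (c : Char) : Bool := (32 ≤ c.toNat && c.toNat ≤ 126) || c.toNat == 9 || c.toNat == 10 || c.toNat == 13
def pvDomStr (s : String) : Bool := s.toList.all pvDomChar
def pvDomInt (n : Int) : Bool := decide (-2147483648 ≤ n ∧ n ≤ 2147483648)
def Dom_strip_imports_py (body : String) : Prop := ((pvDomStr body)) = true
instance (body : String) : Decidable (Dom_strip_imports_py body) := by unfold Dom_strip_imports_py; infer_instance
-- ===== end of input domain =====

-- B replaces A's persistent skip_show flag / depth state with an outer loop
-- plus a dedicated inner consumer for an open #show(...) block (alternative decomposition).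

-- ===== PORT A =====
-- one iteration of A's for-loop over state (cleaned, skip_show, depth)
def stripAStep (st : List String × Bool × Int) (line : String) : List String × Bool × Int :=
  let stripped := PySem.Str.strip line
  if PySem.Str.startswith stripped "#import" then st
  else if st.2.1 then
    let depth' := st.2.2 + (PySem.Str.count stripped "(" : Int) - (PySem.Str.count stripped ")" : Int)
    if depth' ≤ 0 then (st.1, false, depth') else (st.1, st.2.1, depth')
  else if PySem.Str.startswith stripped "#show:" && PySem.Str.isIn "rendercv" stripped then
    let d := (PySem.Str.count stripped "(" : Int) - (PySem.Str.count stripped ")" : Int)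
    if d > 0 then (st.1, true, d) else (st.1, st.2.1, d)
  else (st.1 ++ [line], st.2.1, st.2.2)

def strip_imports_py (body : String) : String :=
  -- body.split("\n"): split? is some because the separator "\n" is nonempty
  let lines := (PySem.Str.split? body "\n").getD []
  let st := lines.foldl stripAStep ([], false, 0)
  PySem.Str.strip (PySem.Str.join "\n" st.1)

-- ===== PORT B =====
-- paren balance of a (stripped) line
def pvBal (s : String) : Int :=
  (PySem.Str.count s "(" : Int) - (PySem.Str.count s ")" : Int)

-- B's inner while-loop: consume lines of an open #show block while depth > 0
def stripConsume (d : Int) : List String → List String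
  | [] => []
  | l :: rest =>
    if d ≤ 0 then l :: rest
    else
      let s := PySem.Str.strip l
      if PySem.Str.startswith s "#import" then stripConsume d rest
      else stripConsume (d + pvBal s) rest

theorem stripConsume_length_le (d : Int) (ls : List String) :
    (stripConsume d ls).length ≤ ls.length := by
  induction ls generalizing d with
  | nil => simp [stripConsume]
  | cons l rest ih =>
    simp only [stripConsume]
    split_ifs <;> simp <;> exact le_trans (ih _) (Nat.le_succ _)

-- B's outer while-loop
def stripBLoop : List String → List String
  | [] => []
  | l :: rest =>
    let s := PySem.Str.strip l
    if PySem.Str.startswith s "#import" then stripBLoop rest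
    else if PySem.Str.startswith s "#show:" && PySem.Str.isIn "rendercv" s then
      stripBLoop (stripConsume (pvBal s) rest)
    else l :: stripBLoop rest
termination_by ls => ls.length
decreasing_by
  all_goals simp
  all_goals first
    | omega
    | (have := stripConsume_length_le (pvBal (PySem.Str.strip l)) rest; omega)

def strip_imports_py_alt (body : String) : String :=
  PySem.Str.strip (PySem.Str.join "\n" (stripBLoop ((PySem.Str.split? body "\n").getD [])))

-- ===== PRECONDITION & SPEC =====
def Spec_strip_imports_py (body : String) (out : String) : Prop := out = strip_imports_py_alt body
instance (body : String) (out : String) : Decidable (Spec_strip_imports_py body out) := by unfold Spec_strip_imports_py; infer_instance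

-- ===== CLAIM (what is proved, stated in full; the proofs are below) =====
def Claim_equal_strip_imports_py : Prop := ∀ (body : String), Dom_strip_imports_py body → Spec_strip_imports_py body (strip_imports_py body)

-- ===== LEMMAS AND PROOFS =====

theorem stripConsume_nonpos (d : Int) (ls : List String) (h : d ≤ 0) :
    stripConsume d ls = ls := by
  cases ls with
  | nil => rfl
  | cons l rest => simp [stripConsume, h]

-- the core invariant: A's fold with flag off produces stripBLoop; with flag on (depth > 0)
-- it produces stripBLoop after consuming the open block
theorem strip_loops_agree (ls : List String) :
    (∀ cleaned d, (List.foldl stripAStep (cleaned, false, d) ls).1 = cleaned ++ stripBLoop ls)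
    ∧ (∀ cleaned d, 0 < d →
        (List.foldl stripAStep (cleaned, true, d) ls).1
          = cleaned ++ stripBLoop (stripConsume d ls)) := by
  induction ls with
  | nil => simp [stripBLoop, stripConsume]
  | cons l rest ih =>
    obtain ⟨ih1, ih2⟩ := ih
    constructor
    · intro cleaned d
      simp only [List.foldl_cons, stripAStep, stripBLoop]
      by_cases himp : PySem.Str.startswith (PySem.Str.strip l) "#import" = true
      · simp only [himp, if_true, ih1]
      · rw [Bool.not_eq_true] at himp
        simp only [himp, Bool.false_eq_true, if_false]
        by_cases hshow : (PySem.Str.startswith (PySem.Str.strip l) "#show:"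
            && PySem.Str.isIn "rendercv" (PySem.Str.strip l)) = true
        · simp only [hshow, if_true]
          by_cases hd : ((PySem.Str.count (PySem.Str.strip l) "(" : Int)
              - (PySem.Str.count (PySem.Str.strip l) ")" : Int)) > 0
          · rw [if_pos hd, ih2 _ _ hd]
            simp [pvBal]
          · rw [if_neg hd, ih1,
              stripConsume_nonpos _ _ (by simp only [pvBal]; omega)]
        · rw [Bool.not_eq_true] at hshow
          simp only [hshow, Bool.false_eq_true, if_false, ih1,
            List.append_assoc, List.singleton_append]
    · intro cleaned d hd
      simp only [List.foldl_cons, stripAStep, stripConsume,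
        if_neg (not_le.mpr hd)]
      by_cases himp : PySem.Str.startswith (PySem.Str.strip l) "#import" = true
      · simp only [himp, if_true, ih2 _ _ hd]
      · rw [Bool.not_eq_true] at himp
        simp only [himp, Bool.false_eq_true, if_false, if_true]
        by_cases hle : d + (PySem.Str.count (PySem.Str.strip l) "(" : Int)
            - (PySem.Str.count (PySem.Str.strip l) ")" : Int) ≤ 0
        · rw [if_pos hle, ih1,
            stripConsume_nonpos (d + pvBal (PySem.Str.strip l)) rest
              (by simp only [pvBal]; omega)]
        · rw [if_neg hle,
            show d + pvBal (PySem.Str.strip l)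
                = d + (PySem.Str.count (PySem.Str.strip l) "(" : Int)
                  - (PySem.Str.count (PySem.Str.strip l) ")" : Int) from by
              simp only [pvBal]; ring,
            ih2 _ _ (by omega)]

-- ===== VERDICT (by name: the statement is the Claim_ definition above) =====
theorem strip_imports_py_spec : Claim_equal_strip_imports_py := by
  intro body _
  unfold Spec_strip_imports_py strip_imports_py strip_imports_py_alt
  show PySem.Str.strip (PySem.Str.join "\n"
      (List.foldl stripAStep ([], false, 0) ((PySem.Str.split? body "\n").getD [])).1) = _
  rw [(strip_loops_agree ((PySem.Str.split? body "\n").getD [])).1 [] 0, List.nil_append]
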